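-- pv_equiv track=rewrite | github.com/daniel-reich/ubiquitous-fiesta | jTBQTDQ568ppnGvq7_23.py | digit_sort
-- ===== SOURCE A (Python) =====
-- def digit_sort(lst):
--   x = sorted(lst, key=lambda x: len(str(x)), reverse = True)
--   while True:
--     c = 0
--     for i in range(len(x)-1):
--       if len(str(x[i])) == len(str(x[i+1])):
--         if x[i] > x[i+1]:
--           x[i],x[i+1] = x[i+1], x[i]
--           c += 1
--     if c == 0:
--       break
--   return x
-- ===== SOURCE B (Python) =====
-- def digit_sort(lst):
--     buckets = {}
--     for v in lst:
--         buckets.setdefault(len(str(v)), []).append(v)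
--     out = []
--     for k in sorted(buckets, reverse=True):
--         out.extend(sorted(buckets[k]))
--     return out
-- ===== Notes on version B (the rewrite author's own statement) =====
-- stated objective: faster
-- what changed: A stable-sorts by digit-count and then runs repeated bubble passes over the whole list until no adjacent equal-digit-count pair is out of order; B instead groups the values into a dict of digit-count buckets in one pass and concatenates the per-bucket ascending sorts over the distinct digit-counts in descending order.
import Mathlib
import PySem

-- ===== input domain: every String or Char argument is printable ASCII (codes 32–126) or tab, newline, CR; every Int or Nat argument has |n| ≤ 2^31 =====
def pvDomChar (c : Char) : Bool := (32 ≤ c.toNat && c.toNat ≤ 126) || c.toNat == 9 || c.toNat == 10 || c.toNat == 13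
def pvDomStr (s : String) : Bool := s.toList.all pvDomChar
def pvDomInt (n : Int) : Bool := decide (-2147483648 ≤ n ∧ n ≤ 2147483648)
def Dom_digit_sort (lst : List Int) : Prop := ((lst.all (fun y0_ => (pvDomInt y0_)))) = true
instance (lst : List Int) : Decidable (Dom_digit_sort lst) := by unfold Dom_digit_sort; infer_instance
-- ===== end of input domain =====

-- B replaces A's sort-then-repeated-bubble-passes with one grouping pass into digit-count
-- buckets and per-bucket sorts (objective: faster; A's repeated passes are quadratic).

-- ===== PORT A =====
-- key used by A: len(str(x))
def pvKey (v : Int) : Int := PySem.Str.len (PySem.Int.toStr v)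

-- one 'for i in range(len(x)-1)' pass of A's while-loop: returns the updated list and the swap count c
def pvPassA : List Int → List Int × Nat
  | [] => ([], 0)
  | [a] => ([a], 0)
  | a :: b :: rest =>
    if pvKey a = pvKey b ∧ a > b then
      let r := pvPassA (a :: rest)
      (b :: r.1, r.2 + 1)
    else
      let r := pvPassA (b :: rest)
      (a :: r.1, r.2)

-- measure for the while-loop: number of pairs i < j with equal key and x_i > x_j
def pvInv : List Int → Nat
  | [] => 0
  | a :: t => t.countP (fun b => decide (pvKey a = pvKey b ∧ a > b)) + pvInv t

-- termination lemmas for the while-loop (cited in decreasing_by)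
theorem pvPassA_perm (x : List Int) : (pvPassA x).1.Perm x := by
  induction x using pvPassA.induct with
  | case1 => simp [pvPassA]
  | case2 a => simp [pvPassA]
  | case3 a b rest h ih =>
    simp only [pvPassA, if_pos h]
    exact (ih.cons b).trans (List.Perm.swap a b rest)
  | case4 a b rest h ih =>
    simp only [pvPassA, if_neg h]
    exact ih.cons a

theorem pvPassA_inv (x : List Int) : pvInv (pvPassA x).1 + (pvPassA x).2 ≤ pvInv x := by
  induction x using pvPassA.induct with
  | case1 => simp [pvPassA, pvInv]
  | case2 a => simp [pvPassA, pvInv]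
  | case3 a b rest h ih =>
    simp only [pvPassA, if_pos h]
    have hc := List.Perm.countP_eq (fun y => decide (pvKey b = pvKey y ∧ b > y)) (pvPassA_perm (a :: rest))
    have h1 : pvKey a = pvKey b := h.1
    have h2 : a > b := h.2
    simp only [pvInv, List.countP_cons] at *
    rw [hc]
    have e1 : (decide (pvKey b = pvKey a ∧ b > a)) = false := by simp; omega
    have e2 : (decide (pvKey a = pvKey b ∧ a > b)) = true := by simp [h1, h2]
    simp only [e1, e2] at *
    simp at *
    omega
  | case4 a b rest h ih =>
    simp only [pvPassA, if_neg h]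
    have hc := List.Perm.countP_eq (fun y => decide (pvKey a = pvKey y ∧ a > y)) (pvPassA_perm (b :: rest))
    simp only [pvInv, List.countP_cons] at *
    rw [hc]
    omega

-- A's 'while True: … if c == 0: break'
def pvLoopA (x : List Int) : List Int :=
  match h : pvPassA x with
  | (x', c) => if c = 0 then x' else pvLoopA x'
termination_by pvInv x
decreasing_by
  have hi := pvPassA_inv x
  rw [h] at hi
  simp at hi
  omega

def digit_sort (lst : List Int) : List Int :=
  pvLoopA (PySem.List.sorted lst (fun v => PySem.Str.len (PySem.Int.toStr v)) true)

-- ===== PORT B =====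
def digit_sort_alt (lst : List Int) : List Int :=
  let buckets := lst.foldl
    (fun d v => PySem.Dict.modify d (PySem.Str.len (PySem.Int.toStr v)) [] (fun b => b ++ [v]))
    PySem.Dict.empty
  (PySem.List.sorted (PySem.Dict.keys buckets) (fun k => k) true).foldl
    (fun out k => out ++ PySem.List.sorted (PySem.Dict.getD buckets k []) (fun v => v) false) []

-- ===== PRECONDITION & SPEC =====
def Spec_digit_sort (lst : List Int) (out : List Int) : Prop := out = digit_sort_alt lst
instance (lst : List Int) (out : List Int) : Decidable (Spec_digit_sort lst out) := by unfold Spec_digit_sort; infer_instance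

-- ===== CLAIM (what is proved, stated in full; the proofs are below) =====
def Claim_equal_digit_sort : Prop := ∀ (lst : List Int), Dom_digit_sort lst → Spec_digit_sort lst (digit_sort lst)

-- ===== LEMMAS AND PROOFS =====

-- the total order both results are sorted by: digit-count descending, then value ascending
def pvR (a b : Int) : Prop := pvKey b < pvKey a ∨ (pvKey a = pvKey b ∧ a ≤ b)

theorem pvR_antisymm {a b : Int} (h1 : pvR a b) (h2 : pvR b a) : a = b := by
  unfold pvR at h1 h2; omega

theorem pvPassA_map_key (x : List Int) : (pvPassA x).1.map pvKey = x.map pvKey := by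
  induction x using pvPassA.induct with
  | case1 => simp [pvPassA]
  | case2 a => simp [pvPassA]
  | case3 a b rest h ih =>
    simp only [pvPassA, if_pos h, List.map_cons] at *
    rw [ih, h.1]
  | case4 a b rest h ih =>
    simp only [pvPassA, if_neg h, List.map_cons] at *
    rw [ih]

theorem pvPassA_zero (x : List Int) (h : (pvPassA x).2 = 0) :
    (pvPassA x).1 = x ∧ x.IsChain (fun a b => pvKey a = pvKey b → a ≤ b) := by
  induction x using pvPassA.induct with
  | case1 => simp [pvPassA]
  | case2 a => simp [pvPassA]
  | case3 a b rest hc ih =>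
    simp only [pvPassA, if_pos hc] at h
    omega
  | case4 a b rest hc ih =>
    simp only [pvPassA, if_neg hc] at h ⊢
    obtain ⟨he, hch⟩ := ih h
    refine ⟨by rw [he], ?_⟩
    exact List.isChain_cons_cons.mpr ⟨fun hk => by omega, hch⟩

theorem pvLoopA_spec (x : List Int) :
    (pvLoopA x).Perm x ∧ (pvLoopA x).map pvKey = x.map pvKey ∧
      (pvLoopA x).IsChain (fun a b => pvKey a = pvKey b → a ≤ b) := by
  induction x using pvLoopA.induct with
  | case1 x x' h =>
    have hz := pvPassA_zero x (by rw [h])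
    rw [h] at hz
    simp only at hz
    obtain ⟨h1, h2⟩ := hz
    subst h1
    rw [pvLoopA, h]
    exact ⟨List.Perm.refl _, rfl, h2⟩
  | case2 x x' c h hc ih =>
    rw [pvLoopA, h]
    simp only [if_neg hc]
    have hp : x'.Perm x := by have := pvPassA_perm x; rwa [h] at this
    have hm : x'.map pvKey = x.map pvKey := by have := pvPassA_map_key x; rwa [h] at this
    exact ⟨ih.1.trans hp, ih.2.1.trans hm, ih.2.2⟩

theorem pvPairwise_R_of (x : List Int)
    (h1 : x.Pairwise (fun a b => pvKey b ≤ pvKey a))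
    (h2 : x.IsChain (fun a b => pvKey a = pvKey b → a ≤ b)) : x.Pairwise pvR := by
  induction x with
  | nil => exact List.Pairwise.nil
  | cons a t ih =>
    obtain ⟨ha, h1t⟩ := List.pairwise_cons.mp h1
    match t, h2 with
    | [], _ => simp
    | c :: t', h2 =>
      obtain ⟨hac, h2t⟩ := List.isChain_cons_cons.mp h2
      have iht := ih h1t h2t
      refine List.pairwise_cons.mpr ⟨?_, iht⟩
      intro b hb
      have hba : pvKey b ≤ pvKey a := ha b hb
      rcases eq_or_lt_of_le hba with heq | hlt
      · right
        refine ⟨heq.symm, ?_⟩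
        rcases List.mem_cons.mp hb with rfl | hb'
        · exact hac heq.symm
        · have hkc : pvKey c ≤ pvKey a := ha c (List.mem_cons_self)
          have hbc : pvKey b ≤ pvKey c := (List.pairwise_cons.mp h1t).1 b hb'
          have hkceq : pvKey c = pvKey b := by omega
          have hRcb := (List.pairwise_cons.mp iht).1 b hb'
          have hcb : c ≤ b := by
            rcases hRcb with h | h
            · omega
            · exact h.2
          have hac' : a ≤ c := hac (by omega)
          omega
      · left; exact hlt

theorem pvA_perm (lst : List Int) : (digit_sort lst).Perm lst := by
  exact (pvLoopA_spec _).1.trans (PySem.List.sorted_perm lst _ true)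

theorem pvA_pairwise (lst : List Int) : (digit_sort lst).Pairwise pvR := by
  have hs := PySem.List.sorted_pairwise_rev lst (fun v => PySem.Str.len (PySem.Int.toStr v))
  have hmap : (digit_sort lst).map pvKey
      = (PySem.List.sorted lst (fun v => PySem.Str.len (PySem.Int.toStr v)) true).map pvKey :=
    (pvLoopA_spec _).2.1
  have hsm : ((PySem.List.sorted lst (fun v => PySem.Str.len (PySem.Int.toStr v)) true).map pvKey).Pairwise
      (fun p q => q ≤ p) := by
    exact (List.pairwise_map).mpr hs
  have hdm : ((digit_sort lst).map pvKey).Pairwise (fun p q => q ≤ p) := by rw [hmap]; exact hsm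
  exact pvPairwise_R_of _ ((List.pairwise_map).mp hdm) (pvLoopA_spec _).2.2

-- B-side: the bucket dict built by the fold
def pvBuckets (lst : List Int) : PySem.Dict Int (List Int) :=
  lst.foldl
    (fun d v => PySem.Dict.modify d (PySem.Str.len (PySem.Int.toStr v)) [] (fun b => b ++ [v]))
    PySem.Dict.empty

theorem pvBuckets_getD_gen (lst : List Int) (d : PySem.Dict Int (List Int)) (k : Int) :
    PySem.Dict.getD
      (lst.foldl (fun d v => PySem.Dict.modify d (PySem.Str.len (PySem.Int.toStr v)) [] (fun b => b ++ [v])) d) k []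
      = PySem.Dict.getD d k [] ++ lst.filter (fun v => decide (pvKey v = k)) := by
  induction lst generalizing d with
  | nil => simp
  | cons v t ih =>
    simp only [List.foldl_cons, List.filter_cons, ih]
    by_cases hk : pvKey v = k
    · subst hk
      rw [show PySem.Str.len (PySem.Int.toStr v) = pvKey v from rfl,
        PySem.Dict.getD_modify_self]
      simp [List.append_assoc]
    · rw [show PySem.Str.len (PySem.Int.toStr v) = pvKey v from rfl,
        PySem.Dict.getD_modify_of_ne d [] (fun b => b ++ [v]) (fun h => hk h.symm)]
      simp [hk]

theorem pvBuckets_getD (lst : List Int) (k : Int) :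
    PySem.Dict.getD (pvBuckets lst) k [] = lst.filter (fun v => decide (pvKey v = k)) := by
  unfold pvBuckets
  rw [pvBuckets_getD_gen]
  simp [PySem.Dict.getD, PySem.Dict.empty, PySem.Dict.get?]

theorem pvBuckets_contains_gen (lst : List Int) (d : PySem.Dict Int (List Int)) (k : Int) :
    PySem.Dict.contains
      (lst.foldl (fun d v => PySem.Dict.modify d (PySem.Str.len (PySem.Int.toStr v)) [] (fun b => b ++ [v])) d) k
      = true ↔ PySem.Dict.contains d k = true ∨ k ∈ lst.map pvKey := by
  induction lst generalizing d with
  | nil => simp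
  | cons v t ih =>
    simp only [List.foldl_cons, List.map_cons, List.mem_cons, ih,
      PySem.Dict.contains_modify]
    rw [show PySem.Str.len (PySem.Int.toStr v) = pvKey v from rfl]
    simp only [Bool.or_eq_true, beq_iff_eq]
    tauto

theorem pvBuckets_keys_mem (lst : List Int) (k : Int) :
    k ∈ PySem.Dict.keys (pvBuckets lst) ↔ k ∈ lst.map pvKey := by
  rw [← PySem.Dict.contains_iff_mem_keys]
  unfold pvBuckets
  rw [pvBuckets_contains_gen]
  simp [PySem.Dict.contains, PySem.Dict.empty]

theorem pvBuckets_keys_nodup_gen (lst : List Int) (d : PySem.Dict Int (List Int))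
    (hd : d.keys.Nodup) :
    (PySem.Dict.keys
      (lst.foldl (fun d v => PySem.Dict.modify d (PySem.Str.len (PySem.Int.toStr v)) [] (fun b => b ++ [v])) d)).Nodup := by
  induction lst generalizing d with
  | nil => exact hd
  | cons v t ih =>
    simp only [List.foldl_cons]
    apply ih
    have := PySem.Dict.keys_modify d (PySem.Str.len (PySem.Int.toStr v)) []
      (fun b => b ++ [v])
    rw [this]
    exact PySem.Dict.nodup_keys_insert d _ _ hd

theorem pvBuckets_keys_nodup (lst : List Int) : (PySem.Dict.keys (pvBuckets lst)).Nodup := by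
  exact pvBuckets_keys_nodup_gen lst PySem.Dict.empty PySem.Dict.nodup_keys_empty

theorem pvB_eq_flatMap (lst : List Int) :
    digit_sort_alt lst =
      (PySem.List.sorted (PySem.Dict.keys (pvBuckets lst)) (fun k => k) true).flatMap
        (fun k => PySem.List.sorted (lst.filter (fun v => decide (pvKey v = k))) (fun v => v) false) := by
  show (PySem.List.sorted (PySem.Dict.keys (pvBuckets lst)) (fun k => k) true).foldl
      (fun out k => out ++ PySem.List.sorted (PySem.Dict.getD (pvBuckets lst) k []) (fun v => v) false) [] = _
  rw [PySem.List.foldl_append_eq_flatMap]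
  rw [List.nil_append]
  congr 1
  funext k
  rw [pvBuckets_getD]

-- flatMap of per-key filters over a duplicate-free covering key list is a permutation of the list
theorem pvFlatMap_filter_perm (K : List Int) (lst : List Int) (hK : K.Nodup)
    (hcov : ∀ v ∈ lst, pvKey v ∈ K) :
    (K.flatMap (fun k => lst.filter (fun v => decide (pvKey v = k)))).Perm lst := by
  induction K generalizing lst with
  | nil =>
    cases lst with
    | nil => simp
    | cons v t => exact absurd (hcov v List.mem_cons_self) (by simp)
  | cons k K' ih =>
    simp only [List.flatMap_cons]
    have hK' : K'.Nodup := hK.of_cons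
    have hknot : k ∉ K' := by simp at hK; exact hK.1
    set lst' := lst.filter (fun v => !decide (pvKey v = k)) with hlst'
    have hcov' : ∀ v ∈ lst', pvKey v ∈ K' := by
      intro v hv
      rw [hlst', List.mem_filter] at hv
      rcases List.mem_cons.mp (hcov v hv.1) with h | h
      · simp [h] at hv
      · exact h
    have hsame : K'.flatMap (fun k' => lst.filter (fun v => decide (pvKey v = k')))
        = K'.flatMap (fun k' => lst'.filter (fun v => decide (pvKey v = k'))) := by
      rw [List.flatMap_def, List.flatMap_def]
      congr 1
      apply List.map_congr_left
      intro k' hk'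
      rw [hlst', List.filter_filter]
      apply List.filter_congr
      intro v _
      have : k' ≠ k := fun h => hknot (h ▸ hk')
      by_cases h : pvKey v = k'
      · simp [h, this]
      · simp [h]
    rw [hsame]
    exact ((ih lst' hK' hcov').append_left _).trans
      (List.filter_append_perm (fun v => decide (pvKey v = k)) lst)

theorem pvB_perm (lst : List Int) : (digit_sort_alt lst).Perm lst := by
  rw [pvB_eq_flatMap]
  set K := PySem.List.sorted (PySem.Dict.keys (pvBuckets lst)) (fun k => k) true with hKdef
  have hKperm := PySem.List.sorted_perm (PySem.Dict.keys (pvBuckets lst)) (fun k => k) true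
  have hK : K.Nodup := (hKperm.nodup_iff).mpr (pvBuckets_keys_nodup lst)
  have hcov : ∀ v ∈ lst, pvKey v ∈ K := by
    intro v hv
    rw [hKdef, PySem.List.mem_sorted, pvBuckets_keys_mem]
    exact List.mem_map_of_mem hv
  have hblocks := List.Perm.flatMap_left K
    (fun k _ => PySem.List.sorted_perm (lst.filter (fun v => decide (pvKey v = k))) (fun v => v) false)
  exact hblocks.trans (pvFlatMap_filter_perm K lst hK hcov)

theorem pvB_pairwise (lst : List Int) : (digit_sort_alt lst).Pairwise pvR := by
  rw [pvB_eq_flatMap, List.flatMap_def]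
  set K := PySem.List.sorted (PySem.Dict.keys (pvBuckets lst)) (fun k => k) true with hKdef
  have hKperm := PySem.List.sorted_perm (PySem.Dict.keys (pvBuckets lst)) (fun k => k) true
  have hKnd : K.Nodup := (hKperm.nodup_iff).mpr (pvBuckets_keys_nodup lst)
  have hKle : K.Pairwise (fun p q => q ≤ p) := PySem.List.sorted_pairwise_rev _ (fun k => k)
  have hKlt : K.Pairwise (fun p q => q < p) :=
    (hKle.and hKnd).imp (fun h => lt_of_le_of_ne h.1 (Ne.symm h.2))
  rw [List.pairwise_flatten]
  constructor
  · intro l hl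
    rw [List.mem_map] at hl
    obtain ⟨k, _, rfl⟩ := hl
    have hmem : ∀ a ∈ PySem.List.sorted (lst.filter (fun v => decide (pvKey v = k))) (fun v => v) false,
        pvKey a = k := by
      intro a ha
      rw [PySem.List.mem_sorted, List.mem_filter] at ha
      exact of_decide_eq_true ha.2
    have hle : (PySem.List.sorted (lst.filter (fun v => decide (pvKey v = k))) (fun v => v) false).Pairwise
        (fun a b => a ≤ b) := PySem.List.sorted_pairwise _ (fun v => v)
    exact hle.imp_of_mem (fun ha hb h => Or.inr ⟨(hmem _ ha).trans (hmem _ hb).symm, h⟩)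
  · rw [List.pairwise_map]
    apply hKlt.imp_of_mem
    intro k1 k2 _ _ hlt x hx y hy
    rw [PySem.List.mem_sorted, List.mem_filter] at hx hy
    left
    rw [of_decide_eq_true hx.2, of_decide_eq_true hy.2]
    exact hlt

-- ===== VERDICT (by name: the statement is the Claim_ definition above) =====
theorem digit_sort_spec : Claim_equal_digit_sort := by
  intro lst _
  unfold Spec_digit_sort
  exact List.Perm.eq_of_pairwise
    (fun a b _ _ h1 h2 => pvR_antisymm h1 h2)
    (pvA_pairwise lst) (pvB_pairwise lst)
    ((pvA_perm lst).trans (pvB_perm lst).symm)
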